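-- pv_equiv track=rewrite | github.com/Alex-Beng/ojs | FuckLeetcode/810. 黑板异或游戏.py | xorGame
-- ===== SOURCE A (Python) =====
-- from typing import List
-- from collections import Counter
-- from functools import reduce
--
-- def xorGame(nums: List[int]) -> bool:
--     t = reduce(lambda a, b: a^b, nums, 0)
--     if t==0:
--         return True
--     num2times = Counter(nums)
--     n_sig = 0
--     for t in num2times.values():
--         n_sig += t&1
--
--     return n_sig&1 != 1
-- ===== SOURCE B (Python) =====
-- def xorGame(nums):
--     x = 0
--     for v in nums:
--         x ^= v
--     return x == 0 or len(nums) % 2 == 0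
-- ===== Notes on version B (the rewrite author's own statement) =====
-- stated objective: simpler
-- what changed: B drops the Counter build and the odd-frequency tally, using the identity that the parity of the number of odd-frequency values equals len(nums) % 2, so it is one xor pass plus a length check.
import Mathlib
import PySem

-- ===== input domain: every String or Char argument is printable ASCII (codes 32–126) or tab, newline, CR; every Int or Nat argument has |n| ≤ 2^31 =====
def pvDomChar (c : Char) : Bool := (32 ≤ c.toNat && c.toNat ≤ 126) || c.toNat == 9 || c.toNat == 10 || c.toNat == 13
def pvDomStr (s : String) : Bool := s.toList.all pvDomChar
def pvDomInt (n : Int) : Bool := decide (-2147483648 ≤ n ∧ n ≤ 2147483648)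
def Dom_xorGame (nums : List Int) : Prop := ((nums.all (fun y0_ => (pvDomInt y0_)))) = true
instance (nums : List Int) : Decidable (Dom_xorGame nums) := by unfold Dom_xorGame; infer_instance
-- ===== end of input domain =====

-- B replaces A's Counter build and odd-frequency tally with the parity identity len(nums) % 2 == 0 (simpler, one pass).

-- ===== PORT A =====
def xorGame (nums : List Int) : Bool :=
  let t := nums.foldl (fun a b => PySem.Int.bxor a b) (0 : Int)
  if t = 0 then true
  else
    let num2times := PySem.Dict.counter nums
    let n_sig := num2times.values.foldl (fun s t => s + PySem.Int.band t 1) (0:Int)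
    decide (PySem.Int.band n_sig 1 ≠ 1)

-- ===== PORT B =====
def xorGame_alt (nums : List Int) : Bool :=
  let x := nums.foldl (fun a v => PySem.Int.bxor a v) (0 : Int)
  (x == 0) || (nums.length % 2 == 0)

-- ===== PRECONDITION & SPEC =====
def Spec_xorGame (nums : List Int) (out : Bool) : Prop := out = xorGame_alt nums
instance (nums : List Int) (out : Bool) : Decidable (Spec_xorGame nums out) := by unfold Spec_xorGame; infer_instance

-- ===== CLAIM (what is proved, stated in full; the proofs are below) =====
def Claim_equal_xorGame : Prop := ∀ (nums : List Int), Dom_xorGame nums → Spec_xorGame nums (xorGame nums)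

-- ===== LEMMAS AND PROOFS =====

-- the tallying foldl is a sum of the mapped list
theorem foldl_add_map (l : List Int) (f : Int → Int) (s : Int) :
    l.foldl (fun s t => s + f t) s = s + (l.map f).sum := by
  induction l generalizing s with
  | nil => simp
  | cons x xs ih => simp [List.foldl_cons, ih, add_assoc]

-- parity of a sum of parities
theorem sum_map_emod_two (l : List Int) : (l.map (· % 2)).sum % 2 = l.sum % 2 := by
  induction l with
  | nil => rfl
  | cons x xs ih => simp only [List.map_cons, List.sum_cons]; omega

-- Python `c & 1` is `c % 2`
theorem band_one_emod (c : Int) : PySem.Int.band c 1 = c % 2 := by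
  rw [PySem.Int.band_one, PySem.Int.mod_eq_emod_of_pos (by omega)]

-- the counts over the distinct elements sum to the length
theorem sum_counts (nums : List Int) :
    ((PySem.Set.ofList nums).map (fun k => ((nums.count k : Int)))).sum = (nums.length : Int) := by
  have hperm : (PySem.Set.ofList nums).Perm nums.dedup :=
    (List.perm_ext_iff_of_nodup (PySem.Set.nodup_ofList nums) nums.nodup_dedup).mpr
      (by intro a; simp [PySem.Set.mem_ofList, List.mem_dedup])
  have h1 : ((PySem.Set.ofList nums).map (fun k => ((nums.count k : Int)))).sum
      = ((nums.dedup.map (fun k => ((nums.count k : Int)))).sum) :=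
    (hperm.map _).sum_eq
  have h2 : nums.dedup.map (fun k => ((nums.count k : Nat) : Int))
      = (nums.dedup.map (fun k => nums.count k)).map (fun n : Nat => (n : Int)) := by
    rw [List.map_map]; rfl
  rw [h1, h2, ← Nat.cast_list_sum, List.sum_map_count_dedup_eq_length]

-- ===== VERDICT (by name: the statement is the Claim_ definition above) =====
-- A's second branch computes exactly the parity of the length
theorem branch_parity (nums : List Int) :
    decide (PySem.Int.band
      ((PySem.Dict.counter nums).values.foldl (fun s t => s + PySem.Int.band t 1) (0:Int)) 1 ≠ 1)
      = (nums.length % 2 == 0) := by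
  have hv : (PySem.Dict.counter nums).values
      = (PySem.Set.ofList nums).map (fun k => ((nums.count k : Int))) := by
    simp [PySem.Dict.values, PySem.Dict.items_counter, List.map_map, Function.comp]
  rw [hv, foldl_add_map, zero_add]
  have hmap : ((PySem.Set.ofList nums).map (fun k => ((nums.count k : Int)))).map
      (fun t => PySem.Int.band t 1)
      = ((PySem.Set.ofList nums).map (fun k => ((nums.count k : Int)))).map (· % 2) := by
    simp only [band_one_emod]
  rw [hmap, band_one_emod, sum_map_emod_two, sum_counts]
  have h2 : ((nums.length : Int) % 2 = 0) ↔ (nums.length % 2 = 0) := by omega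
  by_cases h : nums.length % 2 = 0
  · simp [h, h2.mpr h]
  · have h1 : (nums.length : Int) % 2 = 1 := by omega
    simp [h1, h]

theorem xorGame_spec : Claim_equal_xorGame := by
  intro nums _
  unfold Spec_xorGame xorGame xorGame_alt
  by_cases h : nums.foldl (fun a b => PySem.Int.bxor a b) (0:Int) = 0
  · simp [h]
  · simp only [if_neg h, branch_parity]
    simp [h]
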